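-- pv_equiv track=rewrite | github.com/raul-dunca/fundamentals-of-programming-assignment2 | program.py | f_real_part
-- ===== SOURCE A (Python) =====
-- def get_real(Z):
--     return Z[0]
--
-- def f_real_part(complex_list):
--     """
--
--     :param complex_list: the list of complex numbers
--     :return:the first and the last position of the sequence with numbers with a strictly increasing real part
--     """
--     k=int(1)
--     maxi=int(0)
--     p=int(0)
--     for i in range (0,len(complex_list)-1):
--         if(int(get_real(complex_list[i]))<int(get_real(complex_list[i+1]))):  #we compare the real part of 2 consecutive numbers
--             if(k==1):                                                         #if k=1 thath means we can have a potentialy sequence so we save the first pos of it in p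
--                 p=i
--             k=k+1
--         else:                                                                 #if we found a number with a lower real part that means our seqence is finished and we verifie if
--             if maxi<k:                                                        # it has the most elements so far, if that is the case we save the first positoin of in in prim
--                 maxi=k                                                        # and the last position in last
--                 prim=p
--                 last=prim+k
--             k=1
--     if maxi < k:                                                              #after we go through all of the list we may not find a case which leads us
--         prim = p
--         last = prim + k                                                       #to the else aboce(ex: if we have only increasing real part numbers)
--     return [prim,last]
-- ===== SOURCE B (Python) =====
-- def get_real(Z):
--     return Z[0]
--
-- def f_real_part(complex_list):
--     n = len(complex_list)
--     # pass 1: materialize the maximal strictly-increasing runs as (start, length)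
--     runs = []
--     start = 0
--     for i in range(n - 1):
--         if int(get_real(complex_list[i])) >= int(get_real(complex_list[i + 1])):
--             runs.append((start, i + 1 - start))
--             start = i + 1
--     if n > 0:
--         runs.append((start, n - start))
--     # pass 2: first segment of maximum length (strict > keeps earlier ties)
--     best_start, best_len = 0, 1
--     for s, l in runs:
--         if l > best_len:
--             best_start, best_len = s, l
--     return [best_start, best_start + best_len]
-- ===== Notes on version B (the rewrite author's own statement) =====
-- stated objective: alternative
-- what changed: B materializes the maximal strictly-increasing runs as explicit (start,length) segments in one pass and then scans that segment list for the first longest run, instead of A's single loop threading run length, best-so-far and provisional start through mutable state with a post-loop fixup.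
import Mathlib
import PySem

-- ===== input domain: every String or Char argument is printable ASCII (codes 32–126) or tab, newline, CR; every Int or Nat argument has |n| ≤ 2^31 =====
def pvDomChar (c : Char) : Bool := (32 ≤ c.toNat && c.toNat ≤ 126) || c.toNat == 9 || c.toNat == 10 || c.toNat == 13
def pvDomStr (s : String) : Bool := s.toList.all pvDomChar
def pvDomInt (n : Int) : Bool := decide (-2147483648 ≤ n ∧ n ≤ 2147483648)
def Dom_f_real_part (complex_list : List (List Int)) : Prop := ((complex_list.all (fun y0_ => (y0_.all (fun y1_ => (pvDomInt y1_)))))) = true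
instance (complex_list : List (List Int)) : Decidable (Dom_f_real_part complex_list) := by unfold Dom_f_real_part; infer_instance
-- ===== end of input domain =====

-- B materializes the maximal increasing runs in one pass and then scans the run list for the
-- first longest run (objective: alternative decomposition; same asymptotic cost).

-- ===== PORT A =====
-- get_real(Z) = Z[0]; pyGetD is exact under Pre_ (every accessed element is nonempty)
def pvGetRealA (Z : List Int) : Int := PySem.List.pyGetD Z 0 0

-- one iteration of A's for-loop; state = (k, maxi, p, prim/last or not-yet-bound)
def pvStepA (cl : List (List Int)) (st : Int × Int × Int × Option (Int × Int)) (i : Int) :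
    Int × Int × Int × Option (Int × Int) :=
  let (k, maxi, p, pl) := st
  if pvGetRealA (PySem.List.pyGetD cl i []) < pvGetRealA (PySem.List.pyGetD cl (i + 1) []) then
    (k + 1, maxi, if k == 1 then i else p, pl)
  else
    if maxi < k then (1, k, p, some (p, p + k)) else (1, maxi, p, pl)

def f_real_part (complex_list : List (List Int)) : List Int :=
  let st := (PySem.List.pyRange 0 ((complex_list.length : Int) - 1) 1).foldl
      (pvStepA complex_list) (1, 0, 0, none)
  let (k, maxi, p, pl) := st
  if maxi < k then [p, p + k]
  else
    match pl with
    | some (prim, last) => [prim, last]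
    | none => [0, 1]   -- unreachable: maxi < k holds whenever pl is still unbound

-- ===== PORT B =====
def pvGetRealB (Z : List Int) : Int := PySem.List.pyGetD Z 0 0

-- pass 1 body: close the current run at each non-increase boundary; state = (runs, start)
def pvStepB (cl : List (List Int)) (st : List (Int × Int) × Int) (i : Int) :
    List (Int × Int) × Int :=
  let (runs, start) := st
  if pvGetRealB (PySem.List.pyGetD cl (i + 1) []) ≤ pvGetRealB (PySem.List.pyGetD cl i []) then
    (runs ++ [(start, i + 1 - start)], i + 1)
  else (runs, start)

-- pass 2 body: keep the first run of maximum length (strict >)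
def pvBest (b : Int × Int) (r : Int × Int) : Int × Int := if b.2 < r.2 then r else b

def f_real_part_alt (complex_list : List (List Int)) : List Int :=
  let n : Int := complex_list.length
  let rs := (PySem.List.pyRange 0 (n - 1) 1).foldl (pvStepB complex_list) ([], 0)
  let runs := if 0 < n then rs.1 ++ [(rs.2, n - rs.2)] else rs.1
  let b := runs.foldl pvBest (0, 1)
  [b.1, b.1 + b.2]

-- ===== PRECONDITION & SPEC =====
-- Pre_ excludes exactly the inputs where A raises IndexError (Z[0] on an empty inner list,
-- reached whenever the outer list has at least 2 elements); B raises there too.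
def Pre_f_real_part (complex_list : List (List Int)) : Prop :=
  complex_list.length ≤ 1 ∨ ∀ z ∈ complex_list, z ≠ []
instance (complex_list : List (List Int)) : Decidable (Pre_f_real_part complex_list) := by
  unfold Pre_f_real_part; infer_instance
def pvWitness_f_real_part : List (List Int) := [[1, 0], [2, 0], [0, 1]]

def Spec_f_real_part (complex_list : List (List Int)) (out : List Int) : Prop := out = f_real_part_alt complex_list
instance (complex_list : List (List Int)) (out : List Int) : Decidable (Spec_f_real_part complex_list out) := by unfold Spec_f_real_part; infer_instance

-- ===== CLAIM (what is proved, stated in full; the proofs are below) =====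
def Claim_equal_f_real_part : Prop := ∀ (complex_list : List (List Int)), Dom_f_real_part complex_list → Pre_f_real_part complex_list → Spec_f_real_part complex_list (f_real_part complex_list)

-- ===== LEMMAS AND PROOFS =====

-- simulation invariant between A's loop state and B's pass-1 state after t iterations
def pvJ (t k maxi p : Int) (pl : Option (Int × Int)) (runs : List (Int × Int)) (start : Int) : Prop :=
  0 ≤ start ∧ start ≤ t ∧ k = t + 1 - start ∧ (2 ≤ k → p = start) ∧
  match pl with
  | none => maxi = 0 ∧ start = 0 ∧ p = 0 ∧ runs = []
  | some q => 1 ≤ maxi ∧ q.1 = (runs.foldl pvBest (0, 1)).1 ∧ q.2 = q.1 + maxi ∧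
      maxi = (runs.foldl pvBest (0, 1)).2

lemma pvBest_right (b r : Int × Int) (h : b.2 < r.2) : pvBest b r = r := by
  simp [pvBest, h]

lemma pvBest_left (b r : Int × Int) (h : ¬ b.2 < r.2) : pvBest b r = b := by
  simp [pvBest, h]

lemma pvJ_step (cl : List (List Int)) (t k maxi p : Int) (pl : Option (Int × Int))
    (runs : List (Int × Int)) (start : Int) (h : pvJ t k maxi p pl runs start) :
    pvJ (t + 1) (pvStepA cl (k, maxi, p, pl) t).1 (pvStepA cl (k, maxi, p, pl) t).2.1
      (pvStepA cl (k, maxi, p, pl) t).2.2.1 (pvStepA cl (k, maxi, p, pl) t).2.2.2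
      (pvStepB cl (runs, start) t).1 (pvStepB cl (runs, start) t).2 := by
  obtain ⟨h0, h1, h2, h3, h4⟩ := h
  simp only [pvStepA, pvStepB, pvGetRealA, pvGetRealB]
  by_cases hc : PySem.List.pyGetD (PySem.List.pyGetD cl t []) 0 0 <
      PySem.List.pyGetD (PySem.List.pyGetD cl (t + 1) []) 0 0
  · -- increasing: A extends the run, B keeps the state
    have hc' : ¬ (PySem.List.pyGetD (PySem.List.pyGetD cl (t + 1) []) 0 0 ≤
        PySem.List.pyGetD (PySem.List.pyGetD cl t []) 0 0) := by omega
    rw [if_pos hc, if_neg hc']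
    dsimp only
    unfold pvJ
    refine ⟨h0, by omega, by omega, ?_, ?_⟩
    · intro _
      by_cases hk : k = 1
      · simp [hk]; omega
      · simp only [show (k == 1) = false by simp [hk], Bool.false_eq_true, if_false]
        exact h3 (by omega)
    · cases pl with
      | none =>
        obtain ⟨hm0, hs0, hp0, hr0⟩ := h4
        refine ⟨hm0, hs0, ?_, hr0⟩
        by_cases hk : k = 1
        · simp only [show (k == 1) = true by simp [hk], if_true]; omega
        · simp only [show (k == 1) = false by simp [hk], Bool.false_eq_true, if_false]
          exact hp0
      | some q => exact h4
  · -- non-increase: A closes the run (maybe recording it), B appends (start, k) to runs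
    have hc' : PySem.List.pyGetD (PySem.List.pyGetD cl (t + 1) []) 0 0 ≤
        PySem.List.pyGetD (PySem.List.pyGetD cl t []) 0 0 := by omega
    rw [if_neg hc, if_pos hc']
    have hrun : t + 1 - start = k := by omega
    by_cases hm : maxi < k
    · rw [if_pos hm]
      dsimp only
      unfold pvJ
      refine ⟨by omega, by omega, by omega, by omega, ?_⟩
      cases pl with
      | none =>
        obtain ⟨hm0, hs0, hp0, hr0⟩ := h4
        subst hm0 hs0 hp0 hr0
        simp only [List.nil_append, List.foldl_cons, List.foldl_nil, hrun]
        by_cases h1k : (1 : Int) < k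
        · rw [pvBest_right _ _ (by dsimp only; omega)]
          refine ⟨?_, ?_, ?_, ?_⟩ <;> (dsimp only; try omega)
        · rw [pvBest_left _ _ (by dsimp only; omega)]
          refine ⟨?_, ?_, ?_, ?_⟩ <;> (dsimp only; try omega)
      | some q =>
        obtain ⟨hm1, hq1, hq2, hq3⟩ := h4
        simp only [List.foldl_append, List.foldl_cons, List.foldl_nil, hrun]
        rw [pvBest_right _ _ (by dsimp only; omega)]
        have hps : p = start := h3 (by omega)
        refine ⟨?_, ?_, ?_, ?_⟩ <;> (dsimp only; try omega)
    · rw [if_neg hm]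
      dsimp only
      unfold pvJ
      refine ⟨by omega, by omega, by omega, by omega, ?_⟩
      cases pl with
      | none =>
        obtain ⟨hm0, _, _, _⟩ := h4
        omega
      | some q =>
        obtain ⟨hm1, hq1, hq2, hq3⟩ := h4
        simp only [List.foldl_append, List.foldl_cons, List.foldl_nil, hrun]
        rw [pvBest_left _ _ (by dsimp only; omega)]
        exact ⟨hm1, hq1, hq2, hq3⟩

lemma pvJ_loop (cl : List (List Int)) (e : Int) :
    ∀ (m : Nat) (t k maxi p : Int) (pl : Option (Int × Int)) (runs : List (Int × Int)) (start : Int),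
      t + m = e → pvJ t k maxi p pl runs start →
      let a := (PySem.List.pyRange t e 1).foldl (pvStepA cl) (k, maxi, p, pl)
      let b := (PySem.List.pyRange t e 1).foldl (pvStepB cl) (runs, start)
      pvJ e a.1 a.2.1 a.2.2.1 a.2.2.2 b.1 b.2 := by
  intro m
  induction m with
  | zero =>
    intro t k maxi p pl runs start ht h
    rw [PySem.List.pyRange_one_eq_nil (by omega)]
    simpa using (by omega : t = e) ▸ h
  | succ m ih =>
    intro t k maxi p pl runs start ht h
    rw [PySem.List.pyRange_one_cons (by omega)]
    simp only [List.foldl_cons]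
    have := pvJ_step cl t k maxi p pl runs start h
    exact ih (t + 1) _ _ _ _ _ _ (by omega) this

lemma ports_agree (cl : List (List Int)) : f_real_part cl = f_real_part_alt cl := by
  by_cases hn : cl.length = 0
  · simp [f_real_part, f_real_part_alt, hn]
  · have hJ0 : pvJ 0 1 0 0 none [] 0 := by simp [pvJ]
    have hJ := pvJ_loop cl ((cl.length : Int) - 1) (cl.length - 1) 0 1 0 0 none [] 0
      (by omega) hJ0
    simp only at hJ
    set a := (PySem.List.pyRange 0 ((cl.length : Int) - 1) 1).foldl (pvStepA cl) (1, 0, 0, none) with ha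
    set b := (PySem.List.pyRange 0 ((cl.length : Int) - 1) 1).foldl (pvStepB cl) ([], 0) with hb
    obtain ⟨k, maxi, p, pl⟩ := a
    obtain ⟨runs, start⟩ := b
    obtain ⟨h0, h1, h2, h3, h4⟩ := hJ
    dsimp only at h0 h1 h2 h3 h4
    simp only [f_real_part, f_real_part_alt, ← ha, ← hb]
    rw [if_pos (by omega : (0:Int) < (cl.length : Int))]
    have hk : (cl.length : Int) - start = k := by omega
    simp only [List.foldl_append, List.foldl_cons, List.foldl_nil, hk]
    cases pl with
    | none =>
      obtain ⟨hm0, hs0, hp0, hr0⟩ := h4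
      subst hm0 hs0 hp0 hr0
      simp only [List.foldl_nil]
      rw [if_pos (by omega : (0:Int) < k)]
      by_cases h1k : (1:Int) < k
      · rw [pvBest_right _ _ (by dsimp only; omega)]
      · rw [pvBest_left _ _ (by dsimp only; omega)]
        have hk1 : k = 1 := by omega
        rw [hk1]
    | some q =>
      obtain ⟨q1, q2⟩ := q
      obtain ⟨hm1, hq1, hq2, hq3⟩ := h4
      dsimp only at hq1 hq2 hq3
      by_cases hm : maxi < k
      · rw [if_pos hm]
        have hps : p = start := h3 (by omega)
        rw [pvBest_right _ _ (by dsimp only; omega)]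
        rw [hps]
      · rw [if_neg hm]
        rw [pvBest_left _ _ (by dsimp only; omega)]
        dsimp only
        have e1 : q1 = (runs.foldl pvBest (0, 1)).1 := hq1
        have e2 : q2 = (runs.foldl pvBest (0, 1)).1 + (runs.foldl pvBest (0, 1)).2 := by omega
        rw [e1, e2]

-- ===== VERDICT (by name: the statement is the Claim_ definition above) =====
theorem f_real_part_spec : Claim_equal_f_real_part := by
  intro cl _ _
  unfold Spec_f_real_part
  exact ports_agree cl
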